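-- pv_equiv track=rewrite | github.com/pierclgr/SQuAD-Question-Answering | cli_version/compute_answers.py | group_predictions_by_question_id
-- ===== SOURCE A (Python) =====
-- from itertools import groupby
--
-- def group_predictions_by_question_id(idxs: list, predictions: list) -> dict:
--     """
--     Groups answers by id and cleans question that have multiple answers (because of the splitting when the feature is
--     longer than the max length of the model) and remove multiple answers to keep just one
--
--     Parameters
--     ----------
--     idxs: list
--         list of indices
--     predictions: list
--         list of predictions
--
--     Returns
--     -------
--     dict
--         dictionary containing for each question a single answer
--     """
--
--     def get_answer(groups: list) -> str:
--         """
--         Extract the answer from the group of answers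
--
--         Parameters
--         ----------
--         groups: list
--             list of multiple answers for a question
--
--         Returns
--         -------
--         str
--             single answer to the question
--         """
--
--         # remove empty answer
--         answers = [answer for _, answer in groups if answer != ""]
--
--         if not answers:
--             # no answer predicted
--             return ""
--         else:
--             return answers[0]
--
--     keyfunc = lambda elem: elem[0]
--     idx_and_predictions = sorted(zip(idxs, predictions), key=keyfunc)
--     idx_and_predictions = groupby(idx_and_predictions, keyfunc)
--     idx_and_predictions = {key: get_answer(groups) for key, groups in idx_and_predictions}
--
--     return idx_and_predictions
-- ===== SOURCE B (Python) =====
-- def group_predictions_by_question_id(idxs: list, predictions: list) -> dict: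
--     """Single pass: record the first non-empty answer per id, then emit keys in sorted order."""
--     first = {}
--     for i, p in zip(idxs, predictions):
--         if i not in first:
--             first[i] = p
--         elif first[i] == "" and p != "":
--             first[i] = p
--     return {k: first[k] for k in sorted(first)}
-- ===== Notes on version B (the rewrite author's own statement) =====
-- stated objective: alternative
-- what changed: Replaces sort-whole-list + itertools.groupby + per-group scan with a single pass over the pairs that records the first non-empty answer per id in a dict, then sorts only the unique keys for output order (measured ~1.4-1.8x faster, below the 1.5x-at-largest-size bar, so not claimed as faster).
import Mathlib
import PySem

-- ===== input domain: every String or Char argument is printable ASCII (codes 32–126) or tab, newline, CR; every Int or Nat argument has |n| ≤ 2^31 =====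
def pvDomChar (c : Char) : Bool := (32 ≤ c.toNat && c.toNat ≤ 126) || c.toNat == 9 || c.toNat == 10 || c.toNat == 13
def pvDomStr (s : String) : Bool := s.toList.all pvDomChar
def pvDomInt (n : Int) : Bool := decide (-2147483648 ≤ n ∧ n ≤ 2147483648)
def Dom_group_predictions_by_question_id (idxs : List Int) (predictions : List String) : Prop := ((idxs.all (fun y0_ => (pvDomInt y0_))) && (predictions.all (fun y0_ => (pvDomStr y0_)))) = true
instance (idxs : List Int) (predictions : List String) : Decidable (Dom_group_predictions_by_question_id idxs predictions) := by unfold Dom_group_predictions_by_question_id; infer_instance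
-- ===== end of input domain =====

-- B replaces A's sort-everything + groupby + per-group scan by a single dict pass
-- (first non-empty answer per id) followed by a sort of the unique keys only.

-- ===== PORT A =====
-- get_answer: first non-empty answer of a group, else ""
def pvGetAnswer (groups : List (Int × String)) : String :=
  match (groups.filter (fun e => e.2 != "")).map (fun e => e.2) with
  | [] => ""
  | a :: _ => a

-- itertools.groupby(l, key=fst): maximal runs of equal keys, as (key, run) pairs
def pvRuns : List (Int × String) → List (Int × List (Int × String))
  | [] => []
  | x :: xs =>
    (x.1, x :: xs.takeWhile (fun e => e.1 == x.1)) ::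
      pvRuns (xs.dropWhile (fun e => e.1 == x.1))
  termination_by l => l.length
  decreasing_by simpa [Nat.lt_succ_iff] using List.length_dropWhile_le (fun e => e.1 == x.1) xs

def group_predictions_by_question_id (idxs : List Int) (predictions : List String) : List (Int × String) :=
  let idx_and_predictions := PySem.List.sorted (idxs.zip predictions) (fun e => e.1)
  let grouped := pvRuns idx_and_predictions
  (grouped.foldl (fun d kg => d.insert kg.1 (pvGetAnswer kg.2)) PySem.Dict.empty).items

-- ===== PORT B =====
-- one step of B's loop: keep the first non-empty answer seen for each id
def pvUpdate (d : PySem.Dict Int String) (e : Int × String) : PySem.Dict Int String :=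
  match d.get? e.1 with
  | none => d.insert e.1 e.2
  | some v => if v = "" ∧ e.2 ≠ "" then d.insert e.1 e.2 else d

def group_predictions_by_question_id_alt (idxs : List Int) (predictions : List String) : List (Int × String) :=
  let first := (idxs.zip predictions).foldl pvUpdate PySem.Dict.empty
  ((PySem.List.sorted first.keys (fun k => k)).foldl
      (fun d k => d.insert k (first.getD k "")) PySem.Dict.empty).items

-- ===== PRECONDITION & SPEC =====
def Spec_group_predictions_by_question_id (idxs : List Int) (predictions : List String) (out : List (Int × String)) : Prop := out = group_predictions_by_question_id_alt idxs predictions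
instance (idxs : List Int) (predictions : List String) (out : List (Int × String)) : Decidable (Spec_group_predictions_by_question_id idxs predictions out) := by unfold Spec_group_predictions_by_question_id; infer_instance

-- ===== CLAIM (what is proved, stated in full; the proofs are below) =====
def Claim_equal_group_predictions_by_question_id : Prop := ∀ (idxs : List Int) (predictions : List String), Dom_group_predictions_by_question_id idxs predictions → Spec_group_predictions_by_question_id idxs predictions (group_predictions_by_question_id idxs predictions)

-- ===== LEMMAS AND PROOFS =====

-- the first non-empty answer among the entries with id k, else ""
def pvVal (zs : List (Int × String)) (k : Int) : String :=
  pvGetAnswer (zs.filter (fun e => e.1 == k))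

lemma pvGetAnswer_append (l : List (Int × String)) (e : Int × String) :
    pvGetAnswer (l ++ [e]) = if pvGetAnswer l = "" then pvGetAnswer [e] else pvGetAnswer l := by
  unfold pvGetAnswer
  rw [List.filter_append, List.map_append]
  rcases h : (l.filter (fun e => e.2 != "")).map (fun e => e.2) with _ | ⟨a, t⟩
  · rw [h]; simp
  · rw [h]
    have ha : a ≠ "" := by
      have hm : a ∈ (l.filter (fun e => e.2 != "")).map (fun e => e.2) := by rw [h]; simp
      rcases List.mem_map.mp hm with ⟨x, hx, rfl⟩
      simpa using (List.of_mem_filter hx)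
    simp [ha]

lemma pvVal_append (zs : List (Int × String)) (e : Int × String) (k : Int) :
    pvVal (zs ++ [e]) k =
      if e.1 = k ∧ pvVal zs k = "" ∧ e.2 ≠ "" then e.2 else pvVal zs k := by
  unfold pvVal
  rw [List.filter_append]
  by_cases h1 : e.1 = k
  · rw [show ([e].filter (fun x => x.1 == k)) = [e] by simp [h1]]
    rw [pvGetAnswer_append]
    by_cases h2 : pvGetAnswer (zs.filter (fun x => x.1 == k)) = ""
    · by_cases h3 : e.2 = ""
      · simp [h1, h2, h3, pvGetAnswer]
      · simp [h1, h2, h3, pvGetAnswer]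
    · simp [h1, h2]
  · rw [show ([e].filter (fun x => x.1 == k)) = [] by simp [h1]]
    simp [h1]

lemma pvVal_of_not_mem (zs : List (Int × String)) (k : Int) (h : k ∉ zs.map (·.1)) :
    pvVal zs k = "" := by
  unfold pvVal
  rw [show zs.filter (fun e => e.1 == k) = [] from List.filter_eq_nil_iff.mpr (by
    intro e he hk
    exact h (List.mem_map.mpr ⟨e, he, by simpa using hk⟩))]
  rfl

lemma get?_map_keys (K : List Int) (v : Int → String) (x : Int) :
    (PySem.Dict.mk (K.map (fun k => (k, v k)))).get? x = if x ∈ K then some (v x) else none := by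
  induction K with
  | nil => simp [PySem.Dict.get?]
  | cons k K ih =>
    rw [List.map_cons, PySem.Dict.get?_mk_cons]
    by_cases h : k = x
    · simp [h]
    · simp only [beq_iff_eq, h, if_false, ih, List.mem_cons]
      simp [Ne.symm h]

lemma contains_map_keys (K : List Int) (v : Int → String) (x : Int) :
    (PySem.Dict.mk (K.map (fun k => (k, v k)))).contains x = decide (x ∈ K) := by
  induction K with
  | nil => simp [PySem.Dict.contains]
  | cons k K ih =>
    simp only [PySem.Dict.contains, PySem.Dict.items, List.map_cons, List.any_cons] at ih ⊢
    by_cases h : k = x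
    · simp [h]
    · simp only [List.mem_cons]
      simp [h, Ne.symm h, ih]

lemma fold_insert_items {γ : Type} (f : γ → Int) (g : γ → String) :
    ∀ (rs : List γ) (d : PySem.Dict Int String), (rs.map f).Nodup →
      (∀ k ∈ rs.map f, d.contains k = false) →
      (rs.foldl (fun d x => d.insert (f x) (g x)) d).items
        = d.items ++ rs.map (fun x => (f x, g x)) := by
  intro rs
  induction rs with
  | nil => intro d _ _; simp
  | cons r rs ih =>
    intro d hnd hfresh
    rw [List.map_cons] at hnd
    obtain ⟨hr, hnd'⟩ := List.nodup_cons.mp hnd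
    have hc : d.contains (f r) = false := hfresh _ (by simp)
    have hins : (d.insert (f r) (g r)).items = d.items ++ [(f r, g r)] := by
      simp [PySem.Dict.insert, hc]
    have hfresh' : ∀ k ∈ rs.map f, (d.insert (f r) (g r)).contains k = false := by
      intro k hk
      have h1 : d.contains k = false := hfresh k (by simp [hk])
      have hkne : f r ≠ k := fun h => hr (h ▸ hk)
      simp only [PySem.Dict.contains, hins, List.any_append, List.any_cons, List.any_nil,
        Bool.or_eq_false_iff] at h1 ⊢
      exact ⟨h1, by simpa using hkne⟩
    rw [List.foldl_cons, ih _ hnd' hfresh', hins]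
    simp

lemma ofList_append_single (l : List Int) (x : Int) :
    PySem.Set.ofList (l ++ [x]) = PySem.Set.add (PySem.Set.ofList l) x := by
  simp [PySem.Set.ofList, List.foldl_append]

lemma B_dict (zs : List (Int × String)) :
    zs.foldl pvUpdate PySem.Dict.empty =
      PySem.Dict.mk ((PySem.Set.ofList (zs.map (·.1))).map (fun k => (k, pvVal zs k))) := by
  induction zs using List.reverseRecOn with
  | nil => rfl
  | append_singleton zs e ih =>
    rw [List.foldl_append, List.foldl_cons, List.foldl_nil, ih]
    rw [show (zs ++ [e]).map (·.1) = zs.map (·.1) ++ [e.1] by simp, ofList_append_single]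
    by_cases hm : e.1 ∈ PySem.Set.ofList (zs.map (·.1))
    · -- key already present
      have hget := get?_map_keys (PySem.Set.ofList (zs.map (·.1))) (pvVal zs) e.1
      rw [if_pos hm] at hget
      have hadd : PySem.Set.add (PySem.Set.ofList (zs.map (·.1))) e.1
          = PySem.Set.ofList (zs.map (·.1)) := by
        simp [PySem.Set.add, PySem.Set.contains, List.contains_iff_mem, hm]
      rw [hadd]
      unfold pvUpdate
      rw [hget]; dsimp only
      by_cases hcond : pvVal zs e.1 = "" ∧ e.2 ≠ ""
      · rw [if_pos hcond]
        have hcont := contains_map_keys (PySem.Set.ofList (zs.map (·.1))) (pvVal zs) e.1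
        apply PySem.Dict.ext
        simp only [PySem.Dict.insert, hcont, decide_eq_true_eq, hm, if_true, PySem.Dict.items]
        rw [List.map_map]
        apply List.map_congr_left
        intro k hk
        rw [pvVal_append]
        by_cases hke : e.1 = k
        · subst hke; simp [hcond]
        · simp [hke, Function.comp_def, Ne.symm hke]
      · rw [if_neg hcond]
        apply PySem.Dict.ext
        simp only [PySem.Dict.items]
        apply List.map_congr_left
        intro k hk
        rw [pvVal_append]
        by_cases hke : e.1 = k
        · subst hke; simp [hcond]
        · simp [hke]
    · -- fresh key
      have hget := get?_map_keys (PySem.Set.ofList (zs.map (·.1))) (pvVal zs) e.1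
      rw [if_neg hm] at hget
      have hadd : PySem.Set.add (PySem.Set.ofList (zs.map (·.1))) e.1
          = PySem.Set.ofList (zs.map (·.1)) ++ [e.1] := by
        simp [PySem.Set.add, PySem.Set.contains, List.contains_iff_mem, hm]
      rw [hadd]
      unfold pvUpdate
      rw [hget]; dsimp only
      have hcont := contains_map_keys (PySem.Set.ofList (zs.map (·.1))) (pvVal zs) e.1
      apply PySem.Dict.ext
      simp only [PySem.Dict.insert, hcont, decide_eq_true_eq, hm, if_false, PySem.Dict.items]
      rw [List.map_append]
      congr 1
      · apply List.map_congr_left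
        intro k hk
        rw [pvVal_append]
        have hke : e.1 ≠ k := fun h => hm (h ▸ hk)
        simp [hke]
      · have hnz : e.1 ∉ zs.map (·.1) := fun h => hm ((PySem.Set.mem_ofList _ _).mpr h)
        have h0 : pvVal zs e.1 = "" := pvVal_of_not_mem zs e.1 hnz
        rw [List.map_singleton, pvVal_append]
        by_cases h2 : e.2 = ""
        · simp [h0, h2]
        · simp [h0, h2]

lemma insertBy_filter (x : Int × String) (k : Int) :
    ∀ ys : List (Int × String), ys.Pairwise (fun a b => a.1 ≤ b.1) →
      (PySem.List.insertBy (fun a b => decide (a.1 < b.1)) x ys).filter (fun e => e.1 == k)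
        = ys.filter (fun e => e.1 == k) ++ if x.1 == k then [x] else [] := by
  intro ys
  induction ys with
  | nil => intro _; by_cases hxk : x.1 = k <;> simp [PySem.List.insertBy, hxk]
  | cons y ys ih =>
    intro hp
    rw [show PySem.List.insertBy (fun a b => decide (a.1 < b.1)) x (y :: ys)
        = if decide (x.1 < y.1) = true then x :: y :: ys
          else y :: PySem.List.insertBy (fun a b => decide (a.1 < b.1)) x ys from rfl]
    by_cases hlt : x.1 < y.1
    · rw [if_pos (by simpa using hlt)]
      by_cases hxk : x.1 = k
      · -- no element of y :: ys has key k
        have hnone : (y :: ys).filter (fun e => e.1 == k) = [] := by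
          apply List.filter_eq_nil_iff.mpr
          intro e he hek
          have hek' : e.1 = k := by simpa using hek
          rcases List.mem_cons.mp he with rfl | hmem
          · omega
          · have : y.1 ≤ e.1 := (List.pairwise_cons.mp hp).1 e hmem
            omega
        rw [hnone]
        simp [hxk, hnone]
      · simp only [List.filter_cons]
        simp [hxk]
    · rw [if_neg (by simpa using hlt)]
      rw [List.filter_cons, List.filter_cons, ih (List.pairwise_cons.mp hp).2]
      by_cases hyk : y.1 = k <;> simp [hyk]

lemma sorted_filter (zs : List (Int × String)) (k : Int) :
    (PySem.List.sorted zs (fun e => e.1)).filter (fun e => e.1 == k)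
      = zs.filter (fun e => e.1 == k) := by
  induction zs using List.reverseRecOn with
  | nil => rfl
  | append_singleton zs x ih =>
    rw [PySem.List.sorted_eq_foldl_insertBy, List.foldl_append, List.foldl_cons, List.foldl_nil,
      ← PySem.List.sorted_eq_foldl_insertBy]
    rw [insertBy_filter x k _ (PySem.List.sorted_pairwise zs (fun e => e.1)), ih,
      List.filter_append]
    by_cases hxk : x.1 = k <;> simp [hxk]

lemma dropWhile_head_false {α : Type} (p : α → Bool) :
    ∀ (l : List α) (r : α) (t : List α), l.dropWhile p = r :: t → p r = false := by
  intro l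
  induction l with
  | nil => intro r t h; simp at h
  | cons a l ih =>
    intro r t h
    rw [List.dropWhile_cons] at h
    by_cases hp : p a
    · exact ih r t (by simpa [hp] using h)
    · have hal : a :: l = r :: t := by simpa [hp] using h
      obtain ⟨rfl, -⟩ := List.cons_eq_cons.mp hal
      simpa using hp

lemma runs_spec : ∀ (n : Nat) (l : List (Int × String)), l.length ≤ n →
    l.Pairwise (fun a b => a.1 ≤ b.1) →
    List.Pairwise (· < ·) ((pvRuns l).map (·.1)) ∧
    (∀ k, k ∈ (pvRuns l).map (·.1) ↔ k ∈ l.map (·.1)) ∧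
    pvRuns l = ((pvRuns l).map (·.1)).map (fun k => (k, l.filter (fun e => e.1 == k))) := by
  intro n
  induction n with
  | zero =>
    intro l hl _
    rw [List.length_eq_zero_iff.mp (Nat.le_zero.mp hl)]
    simp [pvRuns]
  | succ n ih =>
    intro l hl hp
    match l with
    | [] => simp [pvRuns]
    | x :: xs =>
      obtain ⟨hx, hxs⟩ := List.pairwise_cons.mp hp
      have hgrp : ∀ e ∈ xs.takeWhile (fun e => e.1 == x.1), e.1 = x.1 := by
        intro e he; simpa using List.mem_takeWhile_imp he
      have hrest_pair : (xs.dropWhile (fun e => e.1 == x.1)).Pairwise (fun a b => a.1 ≤ b.1) :=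
        hxs.sublist (List.dropWhile_suffix _).sublist
      have hrest_gt : ∀ e ∈ xs.dropWhile (fun e => e.1 == x.1), x.1 < e.1 := by
        intro e he
        have hmem : e ∈ xs := (List.dropWhile_suffix _).sublist.mem he
        have hle : x.1 ≤ e.1 := hx e hmem
        rcases hr : xs.dropWhile (fun e => e.1 == x.1) with _ | ⟨r0, rt⟩
        · rw [hr] at he; simp at he
        · have hr0 : r0.1 ≠ x.1 := by
            simpa using dropWhile_head_false _ xs r0 rt hr
          have hr0le : x.1 ≤ r0.1 := hx r0 ((List.dropWhile_suffix _).sublist.mem (by rw [hr]; simp))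
          rw [hr] at he
          rcases List.mem_cons.mp he with rfl | hrt
          · omega
          · have : r0.1 ≤ e.1 := by
              rw [hr] at hrest_pair
              exact (List.pairwise_cons.mp hrest_pair).1 e hrt
            omega
      have hlen : (xs.dropWhile (fun e => e.1 == x.1)).length ≤ n := by
        have := List.length_dropWhile_le (fun e : Int × String => e.1 == x.1) xs
        simp at hl; omega
      obtain ⟨ih1, ih2, ih3⟩ := ih _ hlen hrest_pair
      have hxsplit : xs.takeWhile (fun e => e.1 == x.1) ++ xs.dropWhile (fun e => e.1 == x.1) = xs :=
        List.takeWhile_append_dropWhile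
      have hrunseq : pvRuns (x :: xs)
          = (x.1, x :: xs.takeWhile (fun e => e.1 == x.1)) ::
              pvRuns (xs.dropWhile (fun e => e.1 == x.1)) := by rw [pvRuns]
      refine ⟨?_, ?_, ?_⟩
      · rw [hrunseq, List.map_cons, List.pairwise_cons]
        refine ⟨?_, ih1⟩
        intro k hk
        rcases List.mem_map.mp ((ih2 k).mp hk) with ⟨e, he, rfl⟩
        exact hrest_gt e he
      · intro k
        rw [hrunseq]
        simp only [List.map_cons, List.mem_cons, ih2]
        constructor
        · rintro (rfl | hk)
          · simp
          · rcases List.mem_map.mp hk with ⟨e, he, rfl⟩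
            exact Or.inr (List.mem_map.mpr ⟨e, (List.dropWhile_suffix _).sublist.mem he, rfl⟩)
        · rintro (rfl | hk)
          · exact Or.inl rfl
          · rcases List.mem_map.mp hk with ⟨e, he, rfl⟩
            rcases (by rw [← hxsplit] at he; exact List.mem_append.mp he) with h1 | h2
            · exact Or.inl (hgrp e h1)
            · exact Or.inr (List.mem_map.mpr ⟨e, h2, rfl⟩)
      · rw [hrunseq, List.map_cons, List.map_cons]
        congr 1
        · have hxsf : xs.filter (fun e => e.1 == x.1) = xs.takeWhile (fun e => e.1 == x.1) := by
            conv_lhs => rw [← hxsplit]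
            rw [List.filter_append,
              List.filter_eq_self.mpr (by intro e he; simpa using hgrp e he),
              List.filter_eq_nil_iff.mpr (by
                intro e he hek
                have := hrest_gt e he
                simp only [beq_iff_eq] at hek
                omega)]
            simp
          rw [List.filter_cons, if_pos (by simp), hxsf]
        · conv_lhs => rw [ih3]
          apply List.map_congr_left
          intro k hk
          have hkmem : k ∈ (xs.dropWhile (fun e => e.1 == x.1)).map (·.1) := (ih2 k).mp hk
          have hkgt : x.1 < k := by
            rcases List.mem_map.mp hkmem with ⟨e, he, rfl⟩
            exact hrest_gt e he
          congr 1
          have hxsf : xs.filter (fun e => e.1 == k)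
              = (xs.dropWhile (fun e => e.1 == x.1)).filter (fun e => e.1 == k) := by
            conv_lhs => rw [← hxsplit]
            rw [List.filter_append, List.filter_eq_nil_iff.mpr (by
              intro e he hek
              have := hgrp e he
              simp only [beq_iff_eq] at hek
              omega)]
            simp
          rw [List.filter_cons, if_neg (by simp; omega), hxsf]

theorem group_predictions_by_question_id_eq (idxs : List Int) (predictions : List String) :
    group_predictions_by_question_id idxs predictions
      = group_predictions_by_question_id_alt idxs predictions := by
  unfold group_predictions_by_question_id group_predictions_by_question_id_alt
  dsimp only
  set zs := idxs.zip predictions with hzs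
  set s := PySem.List.sorted zs (fun e => e.1) with hs
  obtain ⟨h1, h2, h3⟩ := runs_spec s.length s le_rfl (PySem.List.sorted_pairwise zs (fun e => e.1))
  set KA := (pvRuns s).map (·.1) with hKA
  set KB := PySem.Set.ofList (zs.map (·.1)) with hKB
  have hKAnodup : KA.Nodup := h1.imp ne_of_lt
  have hfreshE : ∀ (L : List Int), ∀ k ∈ L, (PySem.Dict.empty (κ := Int) (ν := String)).contains k = false := by
    intro L k _; rfl
  -- A's result
  have hA : ((pvRuns s).foldl (fun d kg => d.insert kg.1 (pvGetAnswer kg.2)) PySem.Dict.empty).items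
      = KA.map (fun k => (k, pvVal zs k)) := by
    rw [fold_insert_items (fun kg => kg.1) (fun kg => pvGetAnswer kg.2) (pvRuns s)
      PySem.Dict.empty hKAnodup (hfreshE _)]
    conv_lhs => rw [h3]
    simp only [List.map_map, PySem.Dict.empty, List.nil_append]
    apply List.map_congr_left
    intro k _
    simp only [Function.comp_def]
    rw [show (PySem.List.sorted zs (fun e => e.1)).filter (fun e => e.1 == k)
        = zs.filter (fun e => e.1 == k) from sorted_filter zs k]
    rfl
  -- B's dict
  have hfirst : zs.foldl pvUpdate PySem.Dict.empty
      = PySem.Dict.mk (KB.map (fun k => (k, pvVal zs k))) := B_dict zs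
  have hkeys : (PySem.Dict.mk (KB.map (fun k => (k, pvVal zs k)))).keys = KB := by
    simp [PySem.Dict.keys, Function.comp_def]
  -- the two key lists agree after sorting
  have hmemKA : ∀ k, k ∈ KA ↔ k ∈ KB := by
    intro k
    rw [h2 k, hKB, PySem.Set.mem_ofList]
    exact ⟨fun h => (((PySem.List.sorted_perm zs (fun e => e.1) false).map (·.1)).mem_iff).mp h,
      fun h => (((PySem.List.sorted_perm zs (fun e => e.1) false).map (·.1)).mem_iff).mpr h⟩
  have hperm : KA.Perm KB :=
    (List.perm_ext_iff_of_nodup hKAnodup (PySem.Set.nodup_ofList _)).mpr hmemKA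
  have hsortB : PySem.List.sorted KB (fun k => k) = KA :=
    PySem.List.sorted_eq_of_perm_of_pairwise_lt KB KA (fun k => k) hperm h1
  rw [hfirst, hkeys, hsortB]
  rw [fold_insert_items (fun k => k) _ KA PySem.Dict.empty (by simpa using hKAnodup)
    (by simpa using hfreshE KA)]
  rw [hA]
  simp only [PySem.Dict.empty, List.nil_append]
  apply List.map_congr_left
  intro k hk
  have hkB : k ∈ KB := (hmemKA k).mp hk
  rw [PySem.Dict.getD, get?_map_keys KB (pvVal zs) k, if_pos hkB]
  rfl

-- ===== VERDICT (by name: the statement is the Claim_ definition above) =====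
theorem group_predictions_by_question_id_spec : Claim_equal_group_predictions_by_question_id := by
  intro idxs predictions _
  unfold Spec_group_predictions_by_question_id
  exact group_predictions_by_question_id_eq idxs predictions
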